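-- pv_equiv track=rewrite | github.com/SlimeSB/ShiCao-Divination | 蓍草占卜.py | generate_Gua
-- ===== SOURCE A (Python) =====
-- def generate_Gua(results):
--     mapping = {6: 0, 7: 1, 8: 0, 9: 1}
--     change_mapping = {6: 1, 7: 1, 8: 0, 9: 0}
--     Gua = [mapping.get(result, None) for result in results]
--     BianGua = [change_mapping.get(result, None) for result in results]
--     Gua.reverse()
--     BianGua.reverse()
--
--     # 卦象名称
--     order = ['坤','复','师','临','谦','明夷','升','泰',
--              '豫','震','解','归妹','小过','丰','恒','大壮',
--              '比','屯','坎','节','蹇','既济','井','需',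
--              '萃','随','困','兑','咸','革','大过','夬',
--              '剥','颐','蒙','损','艮','贲','蛊','大畜',
--              '晋','噬嗑','未济','睽','旅','离','鼎','大有',
--              '观','益','涣','中孚','渐','家人','巽','小畜',
--              '否','无妄','讼','履','遁','同人','姤','乾'
--             ]
--
--     # 将二进制数转换为十进制索引
--     Gua_index = sum(val * (2**idx) for idx, val in enumerate(Gua))
--     BianGua_index = sum(val * (2**idx) for idx, val in enumerate(BianGua))
--
--     return order[Gua_index], order[BianGua_index]
-- ===== SOURCE B (Python) =====
-- def generate_Gua(results):
--     # Single left-to-right Horner fold (first line most significant) instead of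
--     # building reversed bit-lists and summing powers of two.
--     mapping = {6: 0, 7: 1, 8: 0, 9: 1}
--     change_mapping = {6: 1, 7: 1, 8: 0, 9: 0}
--     order = ['坤','复','师','临','谦','明夷','升','泰',
--              '豫','震','解','归妹','小过','丰','恒','大壮',
--              '比','屯','坎','节','蹇','既济','井','需',
--              '萃','随','困','兑','咸','革','大过','夬',
--              '剥','颐','蒙','损','艮','贲','蛊','大畜',
--              '晋','噬嗑','未济','睽','旅','离','鼎','大有',
--              '观','益','涣','中孚','渐','家人','巽','小畜',
--              '否','无妄','讼','履','遁','同人','姤','乾']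
--     gua_index = 0
--     bian_index = 0
--     for r in results:
--         gua_index = gua_index * 2 + mapping[r]
--         bian_index = bian_index * 2 + change_mapping[r]
--     return order[gua_index], order[bian_index]
-- ===== Notes on version B (the rewrite author's own statement) =====
-- stated objective: simpler
-- what changed: Replaces the two reversed bit-lists plus enumerate/power-of-two sums with a single left-to-right Horner fold that accumulates both indices at once.
-- outside the precondition, e.g. on generate_Gua([8, 8, 8, 8, 8, 8, 8]): A returns ('坤', '坤'), B returns ('坤', '坤')
import Mathlib
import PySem

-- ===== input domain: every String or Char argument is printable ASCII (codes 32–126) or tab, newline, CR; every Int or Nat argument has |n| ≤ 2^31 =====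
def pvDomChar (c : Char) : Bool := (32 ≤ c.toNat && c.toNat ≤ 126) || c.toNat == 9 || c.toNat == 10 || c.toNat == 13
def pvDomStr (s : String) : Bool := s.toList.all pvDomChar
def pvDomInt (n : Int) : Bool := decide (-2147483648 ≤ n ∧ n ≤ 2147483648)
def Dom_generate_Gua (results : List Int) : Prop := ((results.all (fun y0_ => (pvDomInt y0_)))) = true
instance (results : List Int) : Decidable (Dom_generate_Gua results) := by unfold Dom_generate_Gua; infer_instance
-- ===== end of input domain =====

-- B replaces A's reversed bit-lists and power-of-two sums by one left-to-right Horner fold; simpler, same O(n) cost.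


def guaOrder : List String :=
  ["坤","复","师","临","谦","明夷","升","泰",
   "豫","震","解","归妹","小过","丰","恒","大壮",
   "比","屯","坎","节","蹇","既济","井","需",
   "萃","随","困","兑","咸","革","大过","夬",
   "剥","颐","蒙","损","艮","贲","蛊","大畜",
   "晋","噬嗑","未济","睽","旅","离","鼎","大有",
   "观","益","涣","中孚","渐","家人","巽","小畜",
   "否","无妄","讼","履","遁","同人","姤","乾"]

-- ===== PORT A =====
-- mapping.get(result, None): Option Int; Python raises TypeError multiplying None — those inputs
-- are excluded by Pre_, the port totalizes the term with .getD 0 there.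
def generate_Gua (results : List Int) : String × String :=
  let mapping : PySem.Dict Int Int := PySem.Dict.ofList [(6, 0), (7, 1), (8, 0), (9, 1)]
  let change_mapping : PySem.Dict Int Int := PySem.Dict.ofList [(6, 1), (7, 1), (8, 0), (9, 0)]
  let Gua : List (Option Int) := results.map (fun result => mapping.get? result)
  let BianGua : List (Option Int) := results.map (fun result => change_mapping.get? result)
  let Gua := Gua.reverse
  let BianGua := BianGua.reverse
  let order := guaOrder
  let Gua_index : Int :=
    ((PySem.List.enumerate Gua).map (fun p => p.2.getD 0 * 2 ^ p.1.toNat)).sum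
  let BianGua_index : Int :=
    ((PySem.List.enumerate BianGua).map (fun p => p.2.getD 0 * 2 ^ p.1.toNat)).sum
  -- order[i]: IndexError (none) outside Pre_, totalized with .getD ""
  ((PySem.List.pyGet? order Gua_index).getD "", (PySem.List.pyGet? order BianGua_index).getD "")

-- ===== PORT B =====
-- mapping[r]: KeyError outside Pre_, totalized with .getD 0 there.
def generate_Gua_alt (results : List Int) : String × String :=
  let mapping : PySem.Dict Int Int := PySem.Dict.ofList [(6, 0), (7, 1), (8, 0), (9, 1)]
  let change_mapping : PySem.Dict Int Int := PySem.Dict.ofList [(6, 1), (7, 1), (8, 0), (9, 0)]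
  let order := guaOrder
  let gb : Int × Int := results.foldl
    (fun gb r => (gb.1 * 2 + (mapping.get? r).getD 0, gb.2 * 2 + (change_mapping.get? r).getD 0))
    (0, 0)
  ((PySem.List.pyGet? order gb.1).getD "", (PySem.List.pyGet? order gb.2).getD "")

-- ===== PRECONDITION & SPEC =====
-- Pre_ excludes elements outside {6,7,8,9} (A raises TypeError there) and lists longer than six
-- lines, on which A raises IndexError except in the accidental case that every extra high line
-- contributes a 0 bit (the all-yin seven-line case cited in claim.json, where A still returns).
def Pre_generate_Gua (results : List Int) : Prop :=
  (∀ x ∈ results, x = 6 ∨ x = 7 ∨ x = 8 ∨ x = 9) ∧ results.length ≤ 6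
instance (results : List Int) : Decidable (Pre_generate_Gua results) := by
  unfold Pre_generate_Gua; infer_instance
def pvWitness_generate_Gua : List Int := [6, 7, 8, 9, 6, 7]

def Spec_generate_Gua (results : List Int) (out : String × String) : Prop := out = generate_Gua_alt results
instance (results : List Int) (out : String × String) : Decidable (Spec_generate_Gua results out) := by unfold Spec_generate_Gua; infer_instance

-- ===== CLAIM (what is proved, stated in full; the proofs are below) =====
def Claim_equal_generate_Gua : Prop := ∀ (results : List Int), Dom_generate_Gua results → Pre_generate_Gua results → Spec_generate_Gua results (generate_Gua results)

-- ===== LEMMAS AND PROOFS =====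

-- sum over an enumerate of an appended element
theorem enumSum_append {α : Type} (g : Int × α → Int) :
    ∀ (l : List α) (x : α) (s : Int),
      ((PySem.List.enumerate (l ++ [x]) s).map g).sum
        = ((PySem.List.enumerate l s).map g).sum + g (s + l.length, x) := by
  intro l
  induction l with
  | nil => intro x s; simp [PySem.List.enumerate]
  | cons y ys ih =>
      intro x s
      simp only [List.cons_append, PySem.List.enumerate_cons, List.map_cons, List.sum_cons,
        ih x (s + 1), List.length_cons]
      push_cast
      rw [show s + 1 + (ys.length : Int) = s + ((ys.length : Int) + 1) by ring]
      ring

-- the Horner fold with an arbitrary accumulator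
theorem horner_acc {α : Type} (h : α → Int) :
    ∀ (l : List α) (a : Int),
      l.foldl (fun acc x => acc * 2 + h x) a
        = a * 2 ^ l.length + l.foldl (fun acc x => acc * 2 + h x) 0 := by
  intro l
  induction l with
  | nil => intro a; simp
  | cons y ys ih =>
      intro a
      simp only [List.foldl_cons, List.length_cons]
      rw [ih (a * 2 + h y), ih (0 * 2 + h y)]
      ring

-- A's reversed enumerate/power sum IS B's left-to-right Horner fold
theorem hornerS {α : Type} (h : α → Int) :
    ∀ (l : List α),
      ((PySem.List.enumerate l.reverse).map (fun p => h p.2 * 2 ^ p.1.toNat)).sum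
        = l.foldl (fun acc x => acc * 2 + h x) 0 := by
  intro l
  induction l with
  | nil => simp
  | cons y ys ih =>
      simp only [List.reverse_cons, List.foldl_cons]
      rw [enumSum_append (fun p => h p.2 * 2 ^ p.1.toNat) ys.reverse y 0, ih,
        horner_acc h ys (0 * 2 + h y)]
      simp only [List.length_reverse, zero_add, Int.toNat_natCast]
      ring

-- B's pair fold splits into two independent Horner folds
theorem pairFold (f c : Int → Int) :
    ∀ (l : List Int) (a b : Int),
      l.foldl (fun gb r => (gb.1 * 2 + f r, gb.2 * 2 + c r)) (a, b)
        = (l.foldl (fun acc r => acc * 2 + f r) a, l.foldl (fun acc r => acc * 2 + c r) b) := by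
  intro l
  induction l with
  | nil => intro a b; rfl
  | cons y ys ih => intro a b; simp only [List.foldl_cons]; exact ih _ _

-- ===== VERDICT (by name: the statement is the Claim_ definition above) =====
theorem generate_Gua_spec : Claim_equal_generate_Gua := by
  intro results _ _
  unfold Spec_generate_Gua generate_Gua generate_Gua_alt
  simp only [pairFold]
  rw [hornerS (fun o : Option Int => o.getD 0)
        (results.map (fun result => (PySem.Dict.ofList [(6, 0), (7, 1), (8, 0), (9, 1)] :
          PySem.Dict Int Int).get? result)),
      hornerS (fun o : Option Int => o.getD 0)
        (results.map (fun result => (PySem.Dict.ofList [(6, 1), (7, 1), (8, 0), (9, 0)] :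
          PySem.Dict Int Int).get? result))]
  simp only [List.foldl_map]
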